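-- pv_equiv track=rewrite | github.com/shivasinghshishodia/LeetCode | 3884-minimum-absolute-difference-in-sliding-submatrix/minimum-absolute-difference-in-sliding-submatrix.py | minAbsDiff
-- ===== SOURCE A (Python) =====
-- def minAbsDiff(grid, k):
--     m, n = len(grid), len(grid[0])
--     ans = [[0]*(n-k+1) for _ in range(m-k+1)]
--
--     for i in range(m-k+1):
--         for j in range(n-k+1):
--
--             vals = []
--             for x in range(i, i+k):
--                 for y in range(j, j+k):
--                     vals.append(grid[x][y])
--
--             # remove duplicates
--             vals = sorted(set(vals))
--
--             # if only one distinct value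
--             if len(vals) == 1:
--                 ans[i][j] = 0
--                 continue
--
--             min_diff = float('inf')
--             for t in range(1, len(vals)):
--                 min_diff = min(min_diff, vals[t] - vals[t-1])
--
--             ans[i][j] = min_diff
--
--     return ans
--     """
--     :type grid: List[List[int]]
--     :type k: int
--     :rtype: List[List[int]]
--     """
-- ===== SOURCE B (Python) =====
-- def minAbsDiff(grid, k):
--     m, n = len(grid), len(grid[0])
--
--     def cell(i, j):
--         vals = [grid[x][y] for x in range(i, i + k) for y in range(j, j + k)]
--         distinct = list(dict.fromkeys(vals))
--         diffs = [abs(a - b) for idx, a in enumerate(distinct) for b in distinct[idx + 1:]]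
--         return min(diffs, default=0)
--
--     return [[cell(i, j) for j in range(n - k + 1)] for i in range(m - k + 1)]
-- ===== Notes on version B (the rewrite author's own statement) =====
-- stated objective: alternative
-- what changed: Per k-by-k window, B replaces A's sort-the-distinct-values-then-scan-adjacent-differences step by a direct minimum over |a-b| for all pairs of distinct window values (insertion-order dedup, no sort), with min(..., default=0) for the <2-distinct case.
-- outside the precondition, e.g. on minAbsDiff([[1, 2]], 0): A returns [[inf, inf, inf], [inf, inf, inf]], B returns [[0, 0, 0], [0, 0, 0]]
import Mathlib
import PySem

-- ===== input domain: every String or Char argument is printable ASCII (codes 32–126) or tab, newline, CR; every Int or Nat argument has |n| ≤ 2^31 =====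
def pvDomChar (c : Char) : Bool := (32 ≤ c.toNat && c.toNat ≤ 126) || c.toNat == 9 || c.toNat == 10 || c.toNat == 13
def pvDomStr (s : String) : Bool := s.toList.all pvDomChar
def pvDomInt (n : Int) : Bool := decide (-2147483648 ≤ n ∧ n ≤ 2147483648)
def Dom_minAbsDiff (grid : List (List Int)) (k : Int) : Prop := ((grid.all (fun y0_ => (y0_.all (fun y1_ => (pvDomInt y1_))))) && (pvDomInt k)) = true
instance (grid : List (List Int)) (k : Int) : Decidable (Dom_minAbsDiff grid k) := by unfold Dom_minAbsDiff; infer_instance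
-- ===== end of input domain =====

-- B replaces A's sort-then-adjacent-differences scan per window by a direct pairwise
-- |a-b| scan over the deduplicated window values (alternative algorithm, same cost class).

-- ===== PORT A =====
-- Python's running 'min_diff = min(min_diff, d)' with min_diff starting at float('inf'): none plays inf.
def pvMinInf (md : Option Int) (d : Int) : Option Int :=
  match md with
  | none => some d
  | some v => some (min v d)

-- 'ans[i][j] = v'
def pvSetCell (ans : List (List Int)) (i j : Int) (v : Int) : List (List Int) :=
  PySem.List.pySetD ans i (PySem.List.pySetD (PySem.List.pyGetD ans i []) j v)

def minAbsDiff (grid : List (List Int)) (k : Int) : List (List Int) :=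
  let m : Int := PySem.List.len grid
  let n : Int := PySem.List.len ((PySem.List.pyGet? grid 0).getD [])  -- grid[0]; grid = [] (IndexError) is excluded by Pre_
  let ans : List (List Int) :=
    (PySem.List.pyRange 0 (m - k + 1) 1).map (fun _ => (PySem.List.pyRange 0 (n - k + 1) 1).map (fun _ => (0 : Int)))
  (PySem.List.pyRange 0 (m - k + 1) 1).foldl (fun ans i =>
    (PySem.List.pyRange 0 (n - k + 1) 1).foldl (fun ans j =>
      let vals : List Int :=
        (PySem.List.pyRange i (i + k) 1).foldl (fun vals x =>
          (PySem.List.pyRange j (j + k) 1).foldl (fun vals y =>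
            vals ++ [PySem.List.pyGetD (PySem.List.pyGetD grid x []) y 0]) vals) []  -- grid[x][y]; IndexError excluded by Pre_
      let vals' : List Int := PySem.List.sorted (PySem.Set.ofList vals) (fun v => v) false  -- sorted(set(vals))
      if vals'.length == 1 then
        pvSetCell ans i j 0
      else
        let md : Option Int :=
          (PySem.List.pyRange 1 (PySem.List.len vals') 1).foldl
            (fun md t => pvMinInf md (PySem.List.pyGetD vals' t 0 - PySem.List.pyGetD vals' (t - 1) 0)) none
        pvSetCell ans i j (md.getD 0)  -- md = none would be float('inf'): excluded by Pre_ (k ≥ 1)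
      ) ans) ans

-- ===== PORT B =====
def pvCell (grid : List (List Int)) (k i j : Int) : Int :=
  let vals : List Int :=
    (PySem.List.pyRange i (i + k) 1).flatMap (fun x =>
      (PySem.List.pyRange j (j + k) 1).map (fun y =>
        PySem.List.pyGetD (PySem.List.pyGetD grid x []) y 0))  -- grid[x][y]; IndexError excluded by Pre_
  let distinct : List Int := PySem.List.dedup vals             -- list(dict.fromkeys(vals))
  let diffs : List Int :=
    (PySem.List.enumerate distinct 0).flatMap (fun p =>
      (PySem.List.slice distinct (some (p.1 + 1)) none).map (fun b => |p.2 - b|))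
  (PySem.List.min? diffs (fun d => d)).getD 0                  -- min(diffs, default=0)

def minAbsDiff_alt (grid : List (List Int)) (k : Int) : List (List Int) :=
  let m : Int := PySem.List.len grid
  let n : Int := PySem.List.len ((PySem.List.pyGet? grid 0).getD [])
  (PySem.List.pyRange 0 (m - k + 1) 1).map (fun i =>
    (PySem.List.pyRange 0 (n - k + 1) 1).map (fun j => pvCell grid k i j))

-- ===== PRECONDITION & SPEC =====
-- Pre_ excludes: empty grid (grid[0] raises IndexError); k ≤ 0 (A stores float('inf'), not an int);
-- and ragged grids whose windows exist (grid[x][y] raises IndexError on a short row).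
def Pre_minAbsDiff (grid : List (List Int)) (k : Int) : Prop :=
  grid ≠ [] ∧ 1 ≤ k ∧
  ((grid.length : Int) < k ∨ ((grid.headD []).length : Int) < k ∨
    ∀ row ∈ grid, (grid.headD []).length ≤ row.length)
instance (grid : List (List Int)) (k : Int) : Decidable (Pre_minAbsDiff grid k) := by
  unfold Pre_minAbsDiff; infer_instance

def pvWitness_minAbsDiff : List (List Int) × Int := ([[1, 2], [3, 4]], 2)

def Spec_minAbsDiff (grid : List (List Int)) (k : Int) (out : List (List Int)) : Prop := out = minAbsDiff_alt grid k
instance (grid : List (List Int)) (k : Int) (out : List (List Int)) : Decidable (Spec_minAbsDiff grid k out) := by unfold Spec_minAbsDiff; infer_instance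

-- ===== CLAIM (what is proved, stated in full; the proofs are below) =====
def Claim_equal_minAbsDiff : Prop := ∀ (grid : List (List Int)) (k : Int), Dom_minAbsDiff grid k → Pre_minAbsDiff grid k → Spec_minAbsDiff grid k (minAbsDiff grid k)

-- ===== LEMMAS AND PROOFS =====

-- adjacent differences of a list (A's scan of the sorted distinct values)
def pvAdj : List Int → List Int
  | a :: b :: r => (b - a) :: pvAdj (b :: r)
  | _ => []

-- all pairwise |a - b| of later elements (B's scan of the distinct values)
def pvPairs : List Int → List Int
  | a :: r => (r.map (fun b => |a - b|)) ++ pvPairs r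
  | [] => []

theorem pvMinInf_foldl_some (t : List Int) : ∀ a : Int, t.foldl pvMinInf (some a) = some (t.foldl min a) := by
  induction t with
  | nil => intro a; rfl
  | cons b t ih => intro a; simpa [pvMinInf] using ih (min a b)

theorem pvMinInf_foldl_none (l : List Int) : l.foldl pvMinInf none = PySem.List.min? l (fun x => x) := by
  cases l with
  | nil => rfl
  | cons a t =>
    rw [PySem.List.min?_id_cons]
    simpa [pvMinInf] using pvMinInf_foldl_some t a

theorem pvAdj_eq_map_range (s : List Int) :
    (List.range (s.length - 1)).map (fun t => s.getD (t + 1) 0 - s.getD t 0) = pvAdj s := by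
  match s with
  | [] => rfl
  | [a] => rfl
  | a :: b :: r =>
    have ih := pvAdj_eq_map_range (b :: r)
    simp only [List.length_cons, Nat.add_sub_cancel] at ih ⊢
    rw [List.range_succ_eq_map]
    simp only [List.map_cons, List.map_map]
    rw [pvAdj]
    refine congrArg₂ List.cons (by simp) ?_
    rw [← ih]
    exact List.map_congr_left (fun t _ => by simp [Function.comp])

theorem pvPairs_eq_diffs_aux (full : List Int) :
    ∀ (l : List Int) (s : Nat), full.drop s = l →
      (PySem.List.enumerate l (s : Int)).flatMap (fun p =>
        (PySem.List.slice full (some (p.1 + 1)) none).map (fun b => |p.2 - b|)) = pvPairs l := by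
  intro l
  induction l with
  | nil => intro s _; simp [PySem.List.enumerate, pvPairs]
  | cons a r ih =>
    intro s hdrop
    rw [PySem.List.enumerate_cons, List.flatMap_cons]
    have h1 : PySem.List.slice full (some ((s : Int) + 1)) none = r := by
      have : ((s : Int) + 1) = ((s + 1 : Nat) : Int) := by push_cast; ring
      rw [this, PySem.List.slice_from_natCast]
      have : full.drop (s + 1) = (full.drop s).drop 1 := by
        rw [List.drop_drop]
      rw [this, hdrop, List.drop_one, List.tail_cons]
    have h2 : full.drop (s + 1) = r := by
      rw [← List.drop_drop, hdrop, List.drop_one, List.tail_cons]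
    rw [pvPairs]
    refine congrArg₂ (· ++ ·) (by rw [h1]) ?_
    have := ih (s + 1) h2
    rw [← this]
    norm_num

theorem pvPairs_eq_diffs (l : List Int) :
    (PySem.List.enumerate l 0).flatMap (fun p =>
      (PySem.List.slice l (some (p.1 + 1)) none).map (fun b => |p.2 - b|)) = pvPairs l := by
  simpa using pvPairs_eq_diffs_aux l l 0 (by simp)

theorem pvAdj_mem (s : List Int) (hs : s.Pairwise (· < ·)) :
    ∀ d ∈ pvAdj s, ∃ a b, a ∈ s ∧ b ∈ s ∧ a < b ∧ d = b - a := by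
  match s with
  | [] => intro d hd; simp [pvAdj] at hd
  | [a] => intro d hd; simp [pvAdj] at hd
  | a :: b :: r =>
    intro d hd
    rw [pvAdj, List.mem_cons] at hd
    rcases hd with h | h
    · exact ⟨a, b, by simp, by simp, (List.pairwise_cons.1 hs).1 b (by simp), h⟩
    · obtain ⟨x, y, hx, hy, hlt, he⟩ := pvAdj_mem (b :: r) (List.pairwise_cons.1 hs).2 d h
      exact ⟨x, y, List.mem_cons_of_mem a hx, List.mem_cons_of_mem a hy, hlt, he⟩

theorem pvPairs_mem (l : List Int) (hl : l.Nodup) :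
    ∀ p ∈ pvPairs l, ∃ a b, a ∈ l ∧ b ∈ l ∧ a ≠ b ∧ p = |a - b| := by
  induction l with
  | nil => intro p hp; simp [pvPairs] at hp
  | cons a r ih =>
    intro p hp
    rw [pvPairs, List.mem_append] at hp
    rcases hp with h | h
    · obtain ⟨b, hb, he⟩ := List.mem_map.1 h
      have hne : a ≠ b := fun hab => (List.nodup_cons.1 hl).1 (hab ▸ hb)
      exact ⟨a, b, by simp, List.mem_cons_of_mem a hb, hne, he.symm⟩
    · obtain ⟨x, y, hx, hy, hne, he⟩ := ih (List.nodup_cons.1 hl).2 p h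
      exact ⟨x, y, List.mem_cons_of_mem a hx, List.mem_cons_of_mem a hy, hne, he⟩

theorem pvPairs_intro (l : List Int) (a b : Int) (ha : a ∈ l) (hb : b ∈ l) (hne : a ≠ b) :
    |a - b| ∈ pvPairs l := by
  induction l with
  | nil => simp at ha
  | cons c r ih =>
    rw [pvPairs, List.mem_append]
    rcases List.mem_cons.1 ha with rfl | ha'
    · have hb' : b ∈ r := by
        rcases List.mem_cons.1 hb with rfl | h
        · exact absurd rfl hne
        · exact h
      exact Or.inl (List.mem_map.2 ⟨b, hb', rfl⟩)
    · rcases List.mem_cons.1 hb with rfl | hb'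
      · refine Or.inl (List.mem_map.2 ⟨a, ha', ?_⟩)
        rw [abs_sub_comm]
      · exact Or.inr (ih ha' hb')

theorem pvAdj_bound (s : List Int) (hs : s.Pairwise (· < ·)) :
    ∀ a b : Int, a ∈ s → b ∈ s → a < b → ∃ d ∈ pvAdj s, d ≤ b - a := by
  match s with
  | [] => intro a b ha; simp at ha
  | [c] =>
    intro a b ha hb hlt
    simp at ha hb; omega
  | c :: c' :: r =>
    intro a b ha hb hlt
    rcases List.mem_cons.1 ha with rfl | ha'
    · have hb' : b ∈ c' :: r := by
        rcases List.mem_cons.1 hb with rfl | h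
        · omega
        · exact h
      have hc'b : c' ≤ b := by
        rcases List.mem_cons.1 hb' with rfl | h
        · exact le_refl b
        · exact le_of_lt ((List.pairwise_cons.1 (List.pairwise_cons.1 hs).2).1 b h)
      exact ⟨c' - a, by rw [pvAdj]; simp, by omega⟩
    · have hb' : b ∈ c' :: r := by
        rcases List.mem_cons.1 hb with rfl | h
        · have := (List.pairwise_cons.1 hs).1 a ha'; omega
        · exact h
      obtain ⟨d, hd, hle⟩ := pvAdj_bound (c' :: r) (List.pairwise_cons.1 hs).2 a b ha' hb' hlt
      exact ⟨d, by rw [pvAdj]; exact List.mem_cons_of_mem _ hd, hle⟩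

theorem pvAdj_ne_nil (s : List Int) (h : 2 ≤ s.length) : pvAdj s ≠ [] := by
  match s with
  | [] => simp at h
  | [a] => simp at h
  | a :: b :: r => simp [pvAdj]

theorem pvPairs_ne_nil (l : List Int) (h : 2 ≤ l.length) : pvPairs l ≠ [] := by
  match l with
  | [] => simp at h
  | [a] => simp at h
  | a :: b :: r => simp [pvPairs]

theorem pvMin_adj_eq_pairs (l s : List Int) (hl : l.Nodup) (hperm : s.Perm l)
    (hs : s.Pairwise (· < ·)) (hlen : 2 ≤ l.length) :
    PySem.List.min? (pvAdj s) (fun x => x) = PySem.List.min? (pvPairs l) (fun x => x) := by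
  have hslen : s.length = l.length := hperm.length_eq
  cases hx : PySem.List.min? (pvAdj s) (fun x => x) with
  | none =>
    exact absurd ((PySem.List.min?_eq_none_iff _ _).1 hx) (pvAdj_ne_nil s (by omega))
  | some x =>
  cases hy : PySem.List.min? (pvPairs l) (fun x => x) with
  | none =>
    exact absurd ((PySem.List.min?_eq_none_iff _ _).1 hy) (pvPairs_ne_nil l hlen)
  | some y =>
  have hxmem := PySem.List.min?_mem hx
  have hymem := PySem.List.min?_mem hy
  have hxmin := PySem.List.min?_isMin hx
  have hymin := PySem.List.min?_isMin hy
  congr 1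
  have hxy : x ≤ y := by
    obtain ⟨a, b, ha, hb, hne, he⟩ := pvPairs_mem l hl y hymem
    rcases lt_or_gt_of_ne hne with hab | hab
    · obtain ⟨d, hd, hdle⟩ := pvAdj_bound s hs a b (hperm.mem_iff.2 ha) (hperm.mem_iff.2 hb) hab
      have : y = b - a := by rw [he, abs_of_neg (by omega : a - b < 0)]; ring
      have := hxmin d hd
      simp only at this
      omega
    · obtain ⟨d, hd, hdle⟩ := pvAdj_bound s hs b a (hperm.mem_iff.2 hb) (hperm.mem_iff.2 ha) hab
      have : y = a - b := by rw [he, abs_of_nonneg (by omega : (0:Int) ≤ a - b)]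
      have := hxmin d hd
      simp only at this
      omega
  have hyx : y ≤ x := by
    obtain ⟨a, b, ha, hb, hab, he⟩ := pvAdj_mem s hs x hxmem
    have hmem : |a - b| ∈ pvPairs l :=
      pvPairs_intro l a b (hperm.mem_iff.1 ha) (hperm.mem_iff.1 hb) (ne_of_lt hab)
    have habs : |a - b| = b - a := by rw [abs_of_neg (by omega : a - b < 0)]; ring
    have := hymin _ hmem
    simp only at this
    omega
  omega

-- the value A computes for one window
def pvACell (grid : List (List Int)) (k i j : Int) : Int :=
  let vals : List Int :=
    (PySem.List.pyRange i (i + k) 1).foldl (fun vals x =>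
      (PySem.List.pyRange j (j + k) 1).foldl (fun vals y =>
        vals ++ [PySem.List.pyGetD (PySem.List.pyGetD grid x []) y 0]) vals) []
  let vals' : List Int := PySem.List.sorted (PySem.Set.ofList vals) (fun v => v) false
  if vals'.length == 1 then 0
  else
    ((PySem.List.pyRange 1 (PySem.List.len vals') 1).foldl
      (fun md t => pvMinInf md (PySem.List.pyGetD vals' t 0 - PySem.List.pyGetD vals' (t - 1) 0)) none).getD 0

theorem pvCore (l s : List Int) (hl : l.Nodup) (hperm : s.Perm l) (hs : s.Pairwise (· < ·)) :
    (if s.length == 1 then (0 : Int)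
     else ((PySem.List.pyRange 1 (PySem.List.len s) 1).foldl
        (fun md t => pvMinInf md (PySem.List.pyGetD s t 0 - PySem.List.pyGetD s (t - 1) 0)) none).getD 0)
    = (PySem.List.min? (pvPairs l) (fun d => d)).getD 0 := by
  have hlen : s.length = l.length := hperm.length_eq
  by_cases h1 : s.length = 1
  · simp only [h1, beq_self_eq_true, if_true]
    obtain ⟨x, hx⟩ := List.length_eq_one_iff.1 (by omega : l.length = 1)
    subst hx
    simp [pvPairs, PySem.List.min?]
  · rw [if_neg (by simpa using h1)]
    rcases Nat.eq_zero_or_pos s.length with h0 | hpos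
    · have hsnil : s = [] := List.length_eq_zero_iff.1 h0
      have hlnil : l = [] := List.length_eq_zero_iff.1 (by omega)
      subst hsnil; subst hlnil
      simp [pvPairs, PySem.List.min?, PySem.List.pyRange_one_eq_nil]
    · have h2 : 2 ≤ s.length := by omega
      have hfold : (PySem.List.pyRange 1 (PySem.List.len s) 1).foldl
          (fun md t => pvMinInf md (PySem.List.pyGetD s t 0 - PySem.List.pyGetD s (t - 1) 0)) none
          = PySem.List.min? (pvAdj s) (fun x => x) := by
        rw [PySem.List.len_eq, PySem.List.pyRange_one]
        have hc : (((s.length : Int)) - 1).toNat = s.length - 1 := by omega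
        rw [hc, List.foldl_map]
        have hbody : ∀ (md : Option Int) (kk : Nat), kk ∈ List.range (s.length - 1) →
            pvMinInf md (PySem.List.pyGetD s (1 + (kk : Int)) 0 - PySem.List.pyGetD s (1 + (kk : Int) - 1) 0)
              = pvMinInf md (s.getD (kk + 1) 0 - s.getD kk 0) := by
          intro md kk _
          have e1 : (1 : Int) + (kk : Int) = ((kk + 1 : Nat) : Int) := by omega
          have e2 : (1 : Int) + (kk : Int) - 1 = ((kk : Nat) : Int) := by omega
          rw [e2, e1, PySem.List.pyGetD_natCast, PySem.List.pyGetD_natCast]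
        have hcongr : (List.range (s.length - 1)).foldl
            (fun (md : Option Int) (kk : Nat) => pvMinInf md (PySem.List.pyGetD s (1 + (kk : Int)) 0 - PySem.List.pyGetD s (1 + (kk : Int) - 1) 0)) none
            = (List.range (s.length - 1)).foldl (fun (md : Option Int) (kk : Nat) => pvMinInf md (s.getD (kk + 1) 0 - s.getD kk 0)) none :=
          PySem.List.foldl_congr_mem _ _ _ _ hbody
        rw [hcongr, ← List.foldl_map (f := fun t => s.getD (t + 1) 0 - s.getD t 0) (g := pvMinInf),
          pvAdj_eq_map_range, pvMinInf_foldl_none]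
      rw [hfold, pvMin_adj_eq_pairs l s hl hperm hs (by omega)]

theorem pvCell_eq (grid : List (List Int)) (k i j : Int) :
    pvACell grid k i j = pvCell grid k i j := by
  unfold pvACell pvCell
  simp only [PySem.List.foldl_append_singleton_eq_map, PySem.List.foldl_append_eq_flatMap,
    List.nil_append, PySem.List.dedup_eq_ofList, pvPairs_eq_diffs]
  exact pvCore _ _ (PySem.Set.nodup_ofList _) (PySem.List.sorted_perm _ _ _)
    (PySem.List.sorted_ofList_pairwise_lt _)

theorem pvGetD_set_self {α : Type} (l : List α) (i : Nat) (a d : α) (h : i < l.length) :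
    (l.set i a).getD i d = a := by
  rw [List.getD_eq_getElem _ _ (by simpa using h), List.getElem_set_self]

theorem pvFill_row (js : List Nat) (f : Nat → Int) :
    ∀ (i : Nat) (ans : List (List Int)),
      js.foldl (fun a j => a.set i ((a.getD i []).set j (f j))) ans
        = ans.set i (js.foldl (fun r j => r.set j (f j)) (ans.getD i [])) := by
  induction js with
  | nil =>
    intro i ans
    simp only [List.foldl_nil]
    by_cases h : i < ans.length
    · rw [List.getD_eq_getElem _ _ (by simpa using h)]
      exact (List.set_getElem_self ..).symm
    · rw [List.set_eq_of_length_le (by omega)]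
  | cons j js ih =>
    intro i ans
    simp only [List.foldl_cons]
    rw [ih]
    by_cases h : i < ans.length
    · rw [pvGetD_set_self _ _ _ _ h, List.set_set]
    · rw [List.set_eq_of_length_le (by omega : ans.length ≤ i),
        List.set_eq_of_length_le (by omega : ans.length ≤ i),
        List.set_eq_of_length_le (by omega : ans.length ≤ i)]

theorem pvFill_prefix {α : Type} (g : Nat → α → α) (d : α) :
    ∀ (c : Nat) (l : List α), c ≤ l.length →
      (List.range c).foldl (fun a t => a.set t (g t (a.getD t d))) l
        = (List.range c).map (fun t => g t (l.getD t d)) ++ l.drop c := by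
  intro c
  induction c with
  | zero => intro l _; simp
  | succ c ih =>
    intro l hc
    rw [List.range_succ, List.foldl_append, List.foldl_cons, List.foldl_nil, ih l (by omega)]
    have hlenm : ((List.range c).map (fun t => g t (l.getD t d))).length = c := by simp
    have hcl : c < l.length := by omega
    have hdrop : l.drop c = l[c] :: l.drop (c + 1) := List.drop_eq_getElem_cons hcl
    have hgetD : ((List.range c).map (fun t => g t (l.getD t d)) ++ l.drop c).getD c d = l[c] := by
      rw [List.getD_eq_getElem _ _ (by simp [List.length_drop]; omega)]
      rw [List.getElem_append_right (by omega)]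
      simp only [hlenm, Nat.sub_self, hdrop]
      rfl
    rw [hgetD]
    have hset : ((List.range c).map (fun t => g t (l.getD t d)) ++ l.drop c).set c (g c l[c])
        = (List.range c).map (fun t => g t (l.getD t d)) ++ (g c l[c]) :: l.drop (c + 1) := by
      rw [List.set_append_right _ _ (by omega), hlenm, Nat.sub_self, hdrop]
      rfl
    rw [hset, List.map_append]
    simp only [List.map_cons, List.map_nil, List.append_assoc, List.singleton_append]
    congr 2
    rw [List.getD_eq_getElem _ _ (by simpa using hcl)]

theorem pvFill_matrix (F : Nat → Nat → Int) (Rn Cn : Nat) :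
    (List.range Rn).foldl (fun ans i =>
        (List.range Cn).foldl (fun a j => a.set i ((a.getD i []).set j (F i j))) ans)
      ((List.range Rn).map (fun _ => (List.range Cn).map (fun _ => (0 : Int))))
    = (List.range Rn).map (fun i => (List.range Cn).map (fun j => F i j)) := by
  have hrow : ∀ (i : Nat) (ans : List (List Int)),
      (List.range Cn).foldl (fun a j => a.set i ((a.getD i []).set j (F i j))) ans
        = ans.set i ((List.range Cn).foldl (fun r j => r.set j (F i j)) (ans.getD i [])) := by
    intro i ans
    exact pvFill_row (List.range Cn) (fun j => F i j) i ans
  rw [PySem.List.foldl_congr_mem _ _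
      (fun ans i => ans.set i ((fun i old => (List.range Cn).foldl (fun r j => r.set j (F i j)) old) i (ans.getD i [])))
      _ (fun ans i _ => hrow i ans)]
  rw [pvFill_prefix (fun i old => (List.range Cn).foldl (fun r j => r.set j (F i j)) old) []
      Rn _ (by simp)]
  have hdrop : ((List.range Rn).map (fun _ => (List.range Cn).map (fun _ => (0 : Int)))).drop Rn = [] := by
    apply List.drop_eq_nil_of_le; simp
  rw [hdrop, List.append_nil]
  refine List.map_congr_left ?_
  intro i hi
  have hi' : i < Rn := List.mem_range.mp hi
  have hgetD : ((List.range Rn).map (fun _ => (List.range Cn).map (fun _ => (0 : Int)))).getD i []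
      = (List.range Cn).map (fun _ => (0 : Int)) := by
    rw [List.getD_eq_getElem _ _ (by simpa using hi'), List.getElem_map]
  rw [hgetD]
  have hfill := pvFill_prefix (fun j (_ : Int) => F i j) 0 Cn
      ((List.range Cn).map (fun _ => (0 : Int))) (by simp)
  have hdrop2 : ((List.range Cn).map (fun _ => (0 : Int))).drop Cn = [] := by
    apply List.drop_eq_nil_of_le; simp
  rw [hdrop2, List.append_nil] at hfill
  exact hfill

theorem minAbsDiff_foldl_form (grid : List (List Int)) (k : Int) :
    minAbsDiff grid k
      = (PySem.List.pyRange 0 ((PySem.List.len grid) - k + 1) 1).foldl (fun ans i =>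
          (PySem.List.pyRange 0 ((PySem.List.len ((PySem.List.pyGet? grid 0).getD [])) - k + 1) 1).foldl
            (fun ans j => pvSetCell ans i j (pvACell grid k i j)) ans)
          ((PySem.List.pyRange 0 ((PySem.List.len grid) - k + 1) 1).map (fun _ =>
            (PySem.List.pyRange 0 ((PySem.List.len ((PySem.List.pyGet? grid 0).getD [])) - k + 1) 1).map (fun _ => (0 : Int)))) := by
  simp only [minAbsDiff]
  refine PySem.List.foldl_congr_mem _ _ _ _ ?_
  intro acc i _
  refine PySem.List.foldl_congr_mem _ _ _ _ ?_
  intro acc2 j _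
  simp only [pvACell]
  split_ifs <;> rfl

theorem minAbsDiff_eq_map (grid : List (List Int)) (k : Int) :
    minAbsDiff grid k
      = (PySem.List.pyRange 0 ((PySem.List.len grid) - k + 1) 1).map (fun i =>
          (PySem.List.pyRange 0 ((PySem.List.len ((PySem.List.pyGet? grid 0).getD [])) - k + 1) 1).map (fun j =>
            pvACell grid k i j)) := by
  rw [minAbsDiff_foldl_form,
    PySem.List.pyRange_zero ((PySem.List.len grid) - k + 1),
    PySem.List.pyRange_zero ((PySem.List.len ((PySem.List.pyGet? grid 0).getD [])) - k + 1)]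
  simp only [List.foldl_map, List.map_map, Function.comp_def]
  simp only [pvSetCell, PySem.List.pySetD_natCast, PySem.List.pyGetD_natCast]
  exact pvFill_matrix (fun i j => pvACell grid k (i : Int) (j : Int)) _ _

-- ===== VERDICT (by name: the statement is the Claim_ definition above) =====
theorem minAbsDiff_spec : Claim_equal_minAbsDiff := by
  intro grid k _ _
  unfold Spec_minAbsDiff minAbsDiff_alt
  rw [minAbsDiff_eq_map]
  simp only [pvCell_eq]
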